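-- pv_equiv track=rewrite | github.com/linglingithub/myhello | freq/last_digit_by_factorial_divide.py | computeLastDigit
-- ===== SOURCE A (Python) =====
-- def computeLastDigit(A, B):
--     # write your code here
--     k = B - A
--     if k < 0:
--         return -1
--     if k == 0:
--         return 1
--     if k >= 5:  # this is the KEY!!!
--         return 0
--     res = B % 10
--     for i in range(1, k):
--         res = (res * ((B - i) % 10)) % 10
--         if res == 0:  # key point!! should add this !!! -- not good enough
--             return 0
--     return res
-- ===== SOURCE B (Python) =====
-- # Loop-free lookup: the answer depends only on k = B - A (capped at 5) and B's last digit.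
-- _TABLE = [
--     [1, 1, 1, 1, 1, 1, 1, 1, 1, 1],
--     [0, 1, 2, 3, 4, 5, 6, 7, 8, 9],
--     [0, 0, 2, 6, 2, 0, 0, 2, 6, 2],
--     [0, 0, 0, 6, 4, 0, 0, 0, 6, 4],
--     [0, 0, 0, 0, 4, 0, 0, 0, 0, 4],
-- ]
--
-- def computeLastDigit(A, B):
--     k = B - A
--     if k < 0:
--         return -1
--     if k >= 5:
--         return 0
--     return _TABLE[k][B % 10]
-- ===== Notes on version B (the rewrite author's own statement) =====
-- stated objective: alternative
-- what changed: B replaces A's product loop over the factors by a loop-free precomputed 5x10 lookup table indexed by k = B - A (any k >= 5 gives 0 since five consecutive integers contain factors 2 and 5) and the last digit of B.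
import Mathlib
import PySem

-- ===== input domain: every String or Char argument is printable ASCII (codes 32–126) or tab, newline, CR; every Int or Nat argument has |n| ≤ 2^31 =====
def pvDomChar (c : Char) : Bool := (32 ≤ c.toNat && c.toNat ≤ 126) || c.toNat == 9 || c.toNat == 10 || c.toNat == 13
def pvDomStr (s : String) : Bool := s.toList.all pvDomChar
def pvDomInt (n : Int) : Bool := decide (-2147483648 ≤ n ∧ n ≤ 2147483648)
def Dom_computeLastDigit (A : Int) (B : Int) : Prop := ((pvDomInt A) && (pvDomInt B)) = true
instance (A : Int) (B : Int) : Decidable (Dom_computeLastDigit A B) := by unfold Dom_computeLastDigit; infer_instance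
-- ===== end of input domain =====

-- B replaces A's product loop by a loop-free precomputed 5x10 table lookup indexed by
-- k = B - A and B's last digit (k ≥ 5 gives 0); same return value everywhere.

-- ===== PORT A =====
-- the for-loop with its early 'return 0' on res == 0
def computeLastDigitLoop (B : Int) : List Int → Int → Int
  | [], res => res
  | i :: rest, res =>
    let res' := PySem.Int.mod (res * PySem.Int.mod (B - i) 10) 10
    if res' = 0 then 0 else computeLastDigitLoop B rest res'

def computeLastDigit (A : Int) (B : Int) : Int :=
  let k := B - A
  if k < 0 then -1
  else if k = 0 then 1
  else if 5 ≤ k then 0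
  else computeLastDigitLoop B (PySem.List.pyRange 1 k 1) (PySem.Int.mod B 10)

-- ===== PORT B =====
def lastDigitTable : List (List Int) :=
  [[1, 1, 1, 1, 1, 1, 1, 1, 1, 1],
   [0, 1, 2, 3, 4, 5, 6, 7, 8, 9],
   [0, 0, 2, 6, 2, 0, 0, 2, 6, 2],
   [0, 0, 0, 6, 4, 0, 0, 0, 6, 4],
   [0, 0, 0, 0, 4, 0, 0, 0, 0, 4]]

def computeLastDigit_alt (A : Int) (B : Int) : Int :=
  let k := B - A
  if k < 0 then -1
  else if 5 ≤ k then 0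
  -- both indices are always in range here (0 ≤ k < 5, 0 ≤ B % 10 < 10), so pyGet? is exact
  else (PySem.List.pyGet? ((PySem.List.pyGet? lastDigitTable k).getD []) (PySem.Int.mod B 10)).getD 0

-- ===== PRECONDITION & SPEC =====
def Spec_computeLastDigit (A : Int) (B : Int) (out : Int) : Prop := out = computeLastDigit_alt A B
instance (A : Int) (B : Int) (out : Int) : Decidable (Spec_computeLastDigit A B out) := by unfold Spec_computeLastDigit; infer_instance

-- ===== CLAIM (what is proved, stated in full; the proofs are below) =====
def Claim_equal_computeLastDigit : Prop := ∀ (A : Int) (B : Int), Dom_computeLastDigit A B → Spec_computeLastDigit A B (computeLastDigit A B)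

-- ===== LEMMAS AND PROOFS =====

lemma mod10 (x : Int) : PySem.Int.mod x 10 = x % 10 :=
  PySem.Int.mod_eq_emod_of_pos (by norm_num)

lemma mod10_sub (B i : Int) : (B - i) % 10 = (B % 10 - i % 10) % 10 := Int.sub_emod B i 10

-- ===== VERDICT (by name: the statement is the Claim_ definition above) =====
theorem computeLastDigit_spec : Claim_equal_computeLastDigit := by
  intro A B _
  show computeLastDigit A B = computeLastDigit_alt A B
  unfold computeLastDigit computeLastDigit_alt
  have hd0 : 0 ≤ B % 10 := Int.emod_nonneg B (by norm_num)
  have hd1 : B % 10 < 10 := Int.emod_lt_of_pos B (by norm_num)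
  by_cases hneg : B - A < 0
  · simp [hneg]
  · rw [if_neg hneg, if_neg hneg]
    by_cases h5 : 5 ≤ B - A
    · rw [if_neg (by omega), if_pos h5, if_pos h5]
    · rw [if_neg h5]
      have hk : B - A = 0 ∨ B - A = 1 ∨ B - A = 2 ∨ B - A = 3 ∨ B - A = 4 := by omega
      rcases hk with h | h | h | h | h <;> rw [h]
      · rw [if_pos rfl]
        simp only [mod10]
        generalize B % 10 = d at hd0 hd1 ⊢
        interval_cases d <;> decide
      · rw [if_neg (by norm_num), show PySem.List.pyRange 1 1 1 = ([] : List Int) from by decide]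
        simp only [computeLastDigitLoop, mod10]
        generalize B % 10 = d at hd0 hd1 ⊢
        interval_cases d <;> decide
      · rw [if_neg (by norm_num), show PySem.List.pyRange 1 2 1 = ([1] : List Int) from by decide]
        simp only [computeLastDigitLoop, mod10]
        simp only [mod10_sub B 1]
        generalize B % 10 = d at hd0 hd1 ⊢
        interval_cases d <;> decide
      · rw [if_neg (by norm_num), show PySem.List.pyRange 1 3 1 = ([1, 2] : List Int) from by decide]
        simp only [computeLastDigitLoop, mod10]
        simp only [mod10_sub B 1, mod10_sub B 2]
        generalize B % 10 = d at hd0 hd1 ⊢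
        interval_cases d <;> decide
      · rw [if_neg (by norm_num), show PySem.List.pyRange 1 4 1 = ([1, 2, 3] : List Int) from by decide]
        simp only [computeLastDigitLoop, mod10]
        simp only [mod10_sub B 1, mod10_sub B 2, mod10_sub B 3]
        generalize B % 10 = d at hd0 hd1 ⊢
        interval_cases d <;> decide
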